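-- pv_equiv track=rewrite | github.com/renziyao/CMOSB | Mutiobjective_NSGA2.py | sort_index
-- ===== SOURCE A (Python) =====
-- def sort_index(f, f_value, front):
--     f1 = f.copy()
--     sorted_index = []
--     for i in f_value:
--         for j in range(len(f1)): ## 2: ensure index in current front 3: avoid repeated index in current front
--             if (i == f1[j]) and (j in front) and (j not in sorted_index):
--                 sorted_index.append(j)
--     return sorted_index
-- ===== SOURCE B (Python) =====
-- def sort_index(f, f_value, front):
--     front_set = set(front)
--     by_val = {}
--     for j, v in enumerate(f):
--         if j in front_set:
--             by_val.setdefault(v, []).append(j)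
--     out = []
--     seen = set()
--     for i in f_value:
--         if i not in seen:
--             out += by_val.get(i, [])
--             seen.add(i)
--     return out
-- ===== Notes on version B (the rewrite author's own statement) =====
-- stated objective: faster
-- what changed: Replaces the nested scan (for each value, rescan all of f with list-membership tests against front and the growing output) by one grouping pass that builds a dict value->ascending front indices plus a seen-set over f_value, so each value's indices are emitted once with O(1) lookups.
import Mathlib
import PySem

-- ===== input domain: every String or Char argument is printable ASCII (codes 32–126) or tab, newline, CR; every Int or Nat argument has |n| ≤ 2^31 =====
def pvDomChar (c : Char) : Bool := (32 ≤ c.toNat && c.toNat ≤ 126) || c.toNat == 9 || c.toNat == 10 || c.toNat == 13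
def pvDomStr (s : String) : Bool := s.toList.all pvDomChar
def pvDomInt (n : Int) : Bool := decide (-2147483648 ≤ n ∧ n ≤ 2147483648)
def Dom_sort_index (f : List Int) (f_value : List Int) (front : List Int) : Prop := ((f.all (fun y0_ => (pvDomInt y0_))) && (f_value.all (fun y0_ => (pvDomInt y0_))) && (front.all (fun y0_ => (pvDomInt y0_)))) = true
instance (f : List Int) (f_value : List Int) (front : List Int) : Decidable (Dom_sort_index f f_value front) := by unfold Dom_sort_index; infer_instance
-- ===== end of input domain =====

-- B replaces A's nested rescans by one grouping pass (value -> ascending front indices) plus a seen-set over f_value; measured faster in a timing run; equal output proved below.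


-- ===== PORT A =====
def sort_index (f : List Int) (f_value : List Int) (front : List Int) : List Int :=
  let f1 := f
  f_value.foldl (fun sorted_index i =>
    (PySem.List.pyRange 0 (PySem.List.len f1) 1).foldl (fun sorted_index j =>
      if (i == PySem.List.pyGetD f1 j 0) && front.contains j && !(sorted_index.contains j)
      then sorted_index ++ [j] else sorted_index) sorted_index) []

-- ===== PORT B =====
def sort_index_alt (f : List Int) (f_value : List Int) (front : List Int) : List Int :=
  let front_set : PySem.Set Int := PySem.Set.ofList front
  let by_val : PySem.Dict Int (List Int) :=
    (PySem.List.enumerate f).foldl (fun d p =>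
      if PySem.Set.contains front_set p.1 then d.modify p.2 [] (fun l => l ++ [p.1]) else d)
      PySem.Dict.empty
  (f_value.foldl (fun st i =>
      if PySem.Set.contains st.2 i then st
      else (st.1 ++ by_val.getD i [], PySem.Set.add st.2 i))
    (([] : List Int), (PySem.Set.empty : PySem.Set Int))).1

-- ===== PRECONDITION & SPEC =====
def Spec_sort_index (f : List Int) (f_value : List Int) (front : List Int) (out : List Int) : Prop := out = sort_index_alt f f_value front
instance (f : List Int) (f_value : List Int) (front : List Int) (out : List Int) : Decidable (Spec_sort_index f f_value front out) := by unfold Spec_sort_index; infer_instance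

-- ===== CLAIM (what is proved, stated in full; the proofs are below) =====
def Claim_equal_sort_index : Prop := ∀ (f : List Int) (f_value : List Int) (front : List Int), Dom_sort_index f f_value front → Spec_sort_index f f_value front (sort_index f f_value front)

-- ===== LEMMAS AND PROOFS =====

-- the group of a value v: indices of f (ascending) holding v and lying in front, in A's inner-loop form
def grpA (f front : List Int) (v : Int) : List Int :=
  (PySem.List.pyRange 0 (PySem.List.len f) 1).filter
    (fun j => (v == PySem.List.pyGetD f j 0) && front.contains j)

-- first-occurrence dedup of a list relative to an already-seen list
def dedupF (seen : List Int) : List Int → List Int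
  | [] => []
  | i :: r => if seen.contains i then dedupF seen r else i :: dedupF (i :: seen) r

lemma mem_grpA {f front : List Int} {v j : Int} (h : j ∈ grpA f front v) :
    v = PySem.List.pyGetD f j 0 ∧ front.contains j = true := by
  simp only [grpA, List.mem_filter, Bool.and_eq_true, beq_iff_eq] at h
  exact h.2

lemma grpA_disjoint {f front : List Int} {v w j : Int}
    (hv : j ∈ grpA f front v) (hw : j ∈ grpA f front w) : v = w := by
  rw [(mem_grpA hv).1, (mem_grpA hw).1]

lemma nodup_grpA (f front : List Int) (v : Int) : (grpA f front v).Nodup := by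
  apply List.Nodup.filter
  rw [PySem.List.len_eq, PySem.List.pyRange_zero_natCast]
  exact (List.nodup_range).map (fun a b h => by exact_mod_cast h)

-- A's inner loop appends the not-yet-present elements of the filtered range
lemma inner_foldl (c : Int → Bool) :
    ∀ (l : List Int) (si : List Int), (l.filter c).Nodup →
      l.foldl (fun si j => if c j && !(si.contains j) then si ++ [j] else si) si
        = si ++ (l.filter c).filter (fun j => !(si.contains j)) := by
  intro l
  induction l with
  | nil => intro si _; simp
  | cons j l ih =>
    intro si hnd
    by_cases hc : c j = true
    · rw [List.filter_cons_of_pos hc, List.nodup_cons] at hnd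
      have hnd' : (l.filter c).Nodup := hnd.2
      have hjnot : j ∉ l.filter c := hnd.1
      by_cases hsi : si.contains j = true
      · simp only [List.foldl_cons, hc, hsi, Bool.not_true, Bool.and_false,
          Bool.false_eq_true, if_false]
        rw [ih si hnd', List.filter_cons_of_pos hc,
          List.filter_cons_of_neg (by simpa using hsi)]
      · simp only [List.foldl_cons, hc, hsi, Bool.not_false, Bool.and_true, if_true]
        rw [ih (si ++ [j]) hnd', List.filter_cons_of_pos hc,
          List.filter_cons_of_pos (by simpa using hsi), List.append_assoc]
        simp only [List.singleton_append]
        refine congrArg _ (congrArg _ (List.filter_congr ?_))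
        intro x hx
        have hxj : x ≠ j := fun h => hjnot (h ▸ hx)
        simp [hxj]
    · simp only [List.foldl_cons, hc, Bool.false_and, Bool.false_eq_true, if_false]
      rw [List.filter_cons_of_neg (by simp [hc])] at hnd ⊢
      exact ih si hnd

-- A's outer loop, characterised through dedupF/grpA
lemma A_outer (f front : List Int) :
    ∀ (vs seen si : List Int),
      (∀ j : Int, si.contains j = true ↔ ∃ v, seen.contains v = true ∧ j ∈ grpA f front v) →
      vs.foldl (fun sorted_index i =>
        (PySem.List.pyRange 0 (PySem.List.len f) 1).foldl (fun sorted_index j =>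
          if (i == PySem.List.pyGetD f j 0) && front.contains j && !(sorted_index.contains j)
          then sorted_index ++ [j] else sorted_index) sorted_index) si
        = si ++ (dedupF seen vs).flatMap (grpA f front) := by
  intro vs
  induction vs with
  | nil => intro seen si _; simp [dedupF]
  | cons i vs ih =>
    intro seen si Hsi
    simp only [List.foldl_cons]
    have hinner := inner_foldl (fun j => (i == PySem.List.pyGetD f j 0) && front.contains j)
      (PySem.List.pyRange 0 (PySem.List.len f) 1) si (nodup_grpA f front i)
    rw [hinner]
    by_cases hseen : seen.contains i = true
    · have hnil : (grpA f front i).filter (fun j => !(si.contains j)) = [] := by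
        rw [List.filter_eq_nil_iff]
        intro a ha
        simpa using (Hsi a).2 ⟨i, hseen, ha⟩
      rw [show ((PySem.List.pyRange 0 (PySem.List.len f) 1).filter
            (fun j => (i == PySem.List.pyGetD f j 0) && front.contains j)) = grpA f front i from rfl,
        hnil, List.append_nil, ih seen si Hsi]
      simp only [dedupF, if_pos hseen]
    · have hall : (grpA f front i).filter (fun j => !(si.contains j)) = grpA f front i := by
        rw [List.filter_eq_self]
        intro a ha
        cases h : si.contains a with
        | false => simp
        | true =>
          obtain ⟨v, hv, hav⟩ := (Hsi a).1 h
          exact (hseen ((grpA_disjoint hav ha) ▸ hv)).elim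
      have Hsi' : ∀ j : Int, (si ++ grpA f front i).contains j = true ↔
          ∃ v, (i :: seen).contains v = true ∧ j ∈ grpA f front v := by
        intro j
        rw [List.contains_append, Bool.or_eq_true]
        constructor
        · rintro (h | h)
          · obtain ⟨v, hv, hm⟩ := (Hsi j).1 h
            exact ⟨v, by have := List.contains_iff_mem.mp hv; simp [this], hm⟩
          · exact ⟨i, by simp, List.contains_iff_mem.mp h⟩
        · rintro ⟨v, hv, hm⟩
          rw [List.contains_cons, Bool.or_eq_true] at hv
          rcases hv with hv | hv
          · right
            have : v = i := by simpa using hv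
            exact List.contains_iff_mem.mpr (this ▸ hm)
          · exact Or.inl ((Hsi j).2 ⟨v, hv, hm⟩)
      rw [show ((PySem.List.pyRange 0 (PySem.List.len f) 1).filter
            (fun j => (i == PySem.List.pyGetD f j 0) && front.contains j)) = grpA f front i from rfl,
        hall, ih (i :: seen) (si ++ grpA f front i) Hsi']
      simp only [dedupF, if_neg hseen, List.flatMap_cons, List.append_assoc]

lemma dedupF_congr : ∀ (vs s₁ s₂ : List Int),
    (∀ v : Int, s₁.contains v = s₂.contains v) → dedupF s₁ vs = dedupF s₂ vs := by
  intro vs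
  induction vs with
  | nil => intro _ _ _; rfl
  | cons i vs ih =>
    intro s₁ s₂ h
    simp only [dedupF, h i]
    by_cases hc : s₂.contains i = true
    · rw [if_pos hc, if_pos hc]; exact ih s₁ s₂ h
    · rw [if_neg hc, if_neg hc]
      refine congrArg _ (ih _ _ ?_)
      intro v; rw [List.contains_cons, List.contains_cons, h v]

-- B's grouping dict holds exactly grpA
lemma B_build (f front : List Int) (v : Int) :
    ((PySem.List.enumerate f).foldl (fun d p =>
        if PySem.Set.contains (PySem.Set.ofList front) p.1 then d.modify p.2 [] (fun l => l ++ [p.1]) else d)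
      PySem.Dict.empty).getD v [] = grpA f front v := by
  rw [← List.foldl_filter]
  have h1 : ∀ pairs : List (Int × Int),
      pairs.foldl (fun d p => d.modify p.2 [] (fun l => l ++ [p.1]))
        (PySem.Dict.empty : PySem.Dict Int (List Int))
      = (pairs.map Prod.swap).foldl (fun d q => d.modify q.1 [] (fun l => l ++ [q.2]))
        PySem.Dict.empty := by
    intro pairs; rw [List.foldl_map]; rfl
  rw [h1, PySem.Dict.getD_foldl_modify_append, PySem.Dict.getD_empty, List.nil_append]
  rw [PySem.List.enumerate_eq_map_pyRange f 0]
  simp only [List.filter_map, List.map_map, List.filter_filter, Function.comp,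
    Prod.swap_prod_mk]
  rw [show grpA f front v = ((PySem.List.pyRange 0 (PySem.List.len f) 1).filter
      (fun j => (v == PySem.List.pyGetD f j 0) && front.contains j)).map id from (List.map_id _).symm]
  rw [show PySem.List.pyRange 0 (PySem.List.len f) = PySem.List.pyRange 0 (PySem.List.len f) 1 from rfl]
  congr 1
  apply List.filter_congr
  intro x _
  rw [Bool.beq_comm]
  congr 1
  rw [PySem.Set.contains_eq_listContains]
  simp [PySem.Set.mem_ofList]

-- B's consuming loop, characterised through dedupF
lemma B_consume (g : Int → List Int) :
    ∀ (vs : List Int) (out seen : List Int),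
      (vs.foldl (fun st i =>
          if PySem.Set.contains st.2 i then st
          else (st.1 ++ g i, PySem.Set.add st.2 i)) (out, seen)).1
        = out ++ (dedupF seen vs).flatMap g := by
  intro vs
  induction vs with
  | nil => intro out seen; simp [dedupF]
  | cons i vs ih =>
    intro out seen
    simp only [PySem.Set.contains_eq_listContains] at ih ⊢
    simp only [List.foldl_cons, dedupF]
    by_cases hc : seen.contains i = true
    · rw [if_pos hc, if_pos hc]; exact ih out seen
    · have hadd : PySem.Set.add seen i = seen ++ [i] := by
        simp only [PySem.Set.add, PySem.Set.contains_eq_listContains]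
        rw [if_neg hc]
      rw [if_neg hc, if_neg hc, hadd, ih (out ++ g i) (seen ++ [i]),
        dedupF_congr vs (seen ++ [i]) (i :: seen)
          (fun v => by simp [Bool.or_comm])]
      simp [List.append_assoc]

-- ===== VERDICT (by name: the statement is the Claim_ definition above) =====
theorem sort_index_spec : Claim_equal_sort_index := by
  intro f f_value front _
  show sort_index f f_value front = sort_index_alt f f_value front
  have hA : sort_index f f_value front = [] ++ (dedupF [] f_value).flatMap (grpA f front) :=
    A_outer f front f_value [] [] (by simp)
  have hB : sort_index_alt f f_value front
      = [] ++ (dedupF [] f_value).flatMap (fun i =>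
          ((PySem.List.enumerate f).foldl (fun d p =>
            if PySem.Set.contains (PySem.Set.ofList front) p.1
            then d.modify p.2 [] (fun l => l ++ [p.1]) else d)
            PySem.Dict.empty).getD i []) :=
    B_consume _ f_value [] []
  rw [hA, hB]
  exact congrArg _ (List.flatMap_congr (fun v _ => (B_build f front v).symm))
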